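-- pv_equiv track=rewrite | github.com/michaelrsprague/kaggle-house-prices | src/convert_category_numerical.py | find_column_dictionary
-- ===== SOURCE A (Python) =====
-- def find_column_dictionary(column):
--
--     dictionary = {}
--     value = 0
--
--     for entry in column:
--
--         if entry not in dictionary:
--             dictionary[entry] = value
--             value += 1
--
--     return dictionary
-- ===== SOURCE B (Python) =====
-- def find_column_dictionary(column):
--     # first-occurrence index of each value: overwrite while scanning the
--     # enumerate pairs in reverse, so the smallest index wins (no membership tests)
--     first = {entry: i for i, entry in reversed(list(enumerate(column)))}
--     # keep each entry exactly where it first occurs (positional dedup)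
--     uniq = [entry for i, entry in enumerate(column) if first[entry] == i]
--     return {entry: index for index, entry in enumerate(uniq)}
-- ===== Notes on version B (the rewrite author's own statement) =====
-- stated objective: alternative
-- what changed: Replaces the fused seen-dict-plus-counter loop by positional dedup: build a first-occurrence-index map by overwriting while scanning the enumerate pairs in reverse (no membership tests), keep the entries that stand at their own first index, and let enumerate assign the final incremental indices.
import Mathlib
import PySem

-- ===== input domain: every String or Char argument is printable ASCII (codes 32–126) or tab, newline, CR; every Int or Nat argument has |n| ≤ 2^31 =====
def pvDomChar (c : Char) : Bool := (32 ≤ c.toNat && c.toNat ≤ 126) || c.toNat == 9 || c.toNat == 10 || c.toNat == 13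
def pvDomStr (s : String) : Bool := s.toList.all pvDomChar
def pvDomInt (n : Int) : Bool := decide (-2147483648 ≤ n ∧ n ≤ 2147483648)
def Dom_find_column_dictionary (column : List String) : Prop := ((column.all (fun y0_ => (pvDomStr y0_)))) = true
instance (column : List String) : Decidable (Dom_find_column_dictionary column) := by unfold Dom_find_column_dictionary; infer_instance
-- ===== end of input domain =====

-- B replaces A's fused seen-dict-plus-counter loop by positional dedup (a reverse-overwrite
-- first-index map, a pass keeping entries at their own first index, then enumerate);
-- objective: alternative, same asymptotic cost.

-- ===== PORT A =====
-- A: one loop keeping a dict and a counter, inserting on first sight.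
def find_column_dictionary (column : List String) : List (String × Int) :=
  (column.foldl
    (fun st entry =>
      if st.1.contains entry then st
      else (st.1.insert entry st.2, st.2 + 1))
    ((PySem.Dict.empty : PySem.Dict String Int), (0 : Int))).1.items

-- ===== PORT B =====
-- B: first = {entry: i for i, entry in reversed(list(enumerate(column)))}
--    uniq = [entry for i, entry in enumerate(column) if first[entry] == i]
--    {entry: index for index, entry in enumerate(uniq)}
-- (first[entry] never raises: entry is always a key; ported as get? == some i, exact here)
def find_column_dictionary_alt (column : List String) : List (String × Int) :=
  let first : PySem.Dict String Int :=
    ((PySem.List.enumerate column 0).reverse).foldl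
      (fun d p => d.insert p.2 p.1) PySem.Dict.empty
  let uniq : List String :=
    ((PySem.List.enumerate column 0).filter
      (fun p => first.get? p.2 == some p.1)).map Prod.snd
  (PySem.List.enumerate uniq 0).map (fun p => (p.2, p.1))

-- ===== PRECONDITION & SPEC =====
def Spec_find_column_dictionary (column : List String) (out : List (String × Int)) : Prop := out = find_column_dictionary_alt column
instance (column : List String) (out : List (String × Int)) : Decidable (Spec_find_column_dictionary column out) := by unfold Spec_find_column_dictionary; infer_instance

-- ===== CLAIM (what is proved, stated in full; the proofs are below) =====
def Claim_equal_find_column_dictionary : Prop := ∀ (column : List String), Dom_find_column_dictionary column → Spec_find_column_dictionary column (find_column_dictionary column)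

-- ===== LEMMAS AND PROOFS =====

-- ---- A side: the dict A has built after seeing exactly the unique values s (in order) ----
def pvIdxDict (s : List String) : PySem.Dict String Int :=
  PySem.Dict.mk ((PySem.List.enumerate s 0).map (fun p => (p.2, p.1)))

lemma pvIdxDict_keys (s : List String) : (pvIdxDict s).keys = s := by
  simp [pvIdxDict, PySem.Dict.keys, List.map_map, Function.comp_def,
        PySem.List.map_snd_enumerate]

lemma pvIdxDict_contains (s : List String) (x : String) :
    (pvIdxDict s).contains x = s.contains x := by
  rw [PySem.Dict.contains_eq_decide_mem_keys, pvIdxDict_keys]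
  simp

lemma pvIdxDict_append (s : List String) (x : String) (h : s.contains x = false) :
    (pvIdxDict s).insert x (s.length : Int) = pvIdxDict (s ++ [x]) := by
  apply PySem.Dict.ext
  rw [PySem.Dict.items_insert_of_not_contains _ _ (by rw [pvIdxDict_contains]; exact h)]
  simp [pvIdxDict, PySem.List.enumerate_append]

lemma pv_loop_inv (xs : List String) : ∀ (s : List String),
    xs.foldl
      (fun st entry =>
        if st.1.contains entry then st
        else (st.1.insert entry st.2, st.2 + 1))
      (pvIdxDict s, (s.length : Int))
    = (pvIdxDict (PySem.Set.update s xs), ((PySem.Set.update s xs).length : Int)) := by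
  induction xs with
  | nil => intro s; simp [PySem.Set.update]
  | cons x xs ih =>
    intro s
    have hupd : PySem.Set.update s (x :: xs) = PySem.Set.update (PySem.Set.add s x) xs := by
      simp [PySem.Set.update, List.foldl_cons]
    rw [List.foldl_cons, hupd]
    by_cases h : s.contains x = true
    · have hm : x ∈ s := by simpa using h
      have hadd : PySem.Set.add s x = s := by simp [PySem.Set.add, PySem.Set.contains, hm]
      simp only [pvIdxDict_contains, h, if_pos, hadd]
      exact ih s
    · have h' : s.contains x = false := by simpa using h
      have hm : x ∉ s := by simpa using h'
      have hadd : PySem.Set.add s x = s ++ [x] := by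
        simp [PySem.Set.add, PySem.Set.contains, hm]
      simp only [pvIdxDict_contains, h', Bool.false_eq_true, if_false, hadd]
      rw [pvIdxDict_append s x h']
      have := ih (s ++ [x])
      simpa [List.length_append, Int.natCast_add] using this

lemma pvIdxDict_nil : pvIdxDict [] = PySem.Dict.empty := by
  simp [pvIdxDict, PySem.List.enumerate, PySem.Dict.empty]

lemma pvA_closed (column : List String) :
    find_column_dictionary column
      = (PySem.List.enumerate (PySem.Set.ofList column) 0).map (fun p => (p.2, p.1)) := by
  unfold find_column_dictionary
  rw [show ((PySem.Dict.empty : PySem.Dict String Int), (0 : Int))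
        = (pvIdxDict [], (([] : List String).length : Int)) by rw [pvIdxDict_nil]; rfl]
  rw [pv_loop_inv]
  rfl

-- ---- B side ----

-- get? of the fold of overwriting inserts: the LAST matching pair of l wins.
lemma pvFoldGet (l : List (Int × String)) (d : PySem.Dict String Int) (x : String) :
    (l.foldl (fun d p => d.insert p.2 p.1) d).get? x
      = ((l.reverse.find? (fun p => p.2 == x)).map Prod.fst).or (d.get? x) := by
  induction l generalizing d with
  | nil => simp
  | cons p l ih =>
    rw [List.foldl_cons, ih, List.reverse_cons, List.find?_append]
    cases hf : l.reverse.find? (fun p => p.2 == x) with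
    | some q => simp [Option.or]
    | none =>
      simp only [Option.map_none, Option.none_or]
      rw [PySem.Dict.get?_insert]
      by_cases hx : x = p.2
      · simp [hx, Option.or]
      · have : (p.2 == x) = false := by simpa using fun h => hx h.symm
        simp [hx, this, Option.or]

-- the dict B builds answers with the FIRST occurrence's index
lemma pvFirstGet (column : List String) (x : String) :
    (((PySem.List.enumerate column 0).reverse).foldl
        (fun d p => d.insert p.2 p.1) (PySem.Dict.empty : PySem.Dict String Int)).get? x
      = ((PySem.List.enumerate column 0).find? (fun p => p.2 == x)).map Prod.fst := by
  rw [pvFoldGet, List.reverse_reverse, PySem.Dict.get?_empty]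
  cases (PySem.List.enumerate column 0).find? (fun p => p.2 == x) <;> simp [Option.or]

-- entries standing at their own first index = the distinct values in first-appearance order
lemma pvFilterFirst (xs : List String) (s : Int) :
    ((PySem.List.enumerate xs s).filter
        (fun p => ((PySem.List.enumerate xs s).find? (fun q => q.2 == p.2)).map Prod.fst
                    == some p.1)).map Prod.snd
      = PySem.Set.ofList xs := by
  induction xs generalizing s with
  | nil => simp [PySem.List.enumerate_nil, PySem.Set.ofList]
  | cons h t ih =>
    rw [PySem.List.enumerate_cons, PySem.Set.ofList_cons]
    -- pointwise value of the predicate on the head and on tail elements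
    have hpred : ∀ p ∈ PySem.List.enumerate t (s+1),
        ((((s, h) :: PySem.List.enumerate t (s+1)).find? (fun q => q.2 == p.2)).map Prod.fst
            == some p.1)
          = ((!(p.2 == h)) &&
             (((PySem.List.enumerate t (s+1)).find? (fun q => q.2 == p.2)).map Prod.fst
                == some p.1)) := by
      intro p hp
      rcases (PySem.List.mem_enumerate_iff t (s+1) p).mp hp with ⟨k, hk, rfl⟩
      by_cases hph : t[k] = h
      · rw [List.find?_cons_of_pos (p := fun q => q.2 == (s + 1 + (k : Int), t[k]).2)
              (a := ((s : Int), h)) (l := PySem.List.enumerate t (s+1)) (by simp [hph])]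
        have hne : ¬ (s : Int) = s + 1 + (k : Int) := by omega
        simp [hph, hne]
      · rw [List.find?_cons_of_neg (p := fun q => q.2 == (s + 1 + (k : Int), t[k]).2)
              (a := ((s : Int), h)) (l := PySem.List.enumerate t (s+1))
              (by simp; intro h'; exact hph h'.symm)]
        have : ((s + 1 + (k : Int), t[k]).2 == h) = false := by simpa using hph
        simp [this]
    rw [List.filter_cons]
    have hhd : ((((s, h) :: PySem.List.enumerate t (s+1)).find? (fun q => q.2 == (s, h).2)).map
        Prod.fst == some (s, h).1) = true := by
      rw [List.find?_cons_of_pos (p := fun q => q.2 == ((s : Int), h).2)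
            (a := ((s : Int), h)) (l := PySem.List.enumerate t (s+1)) (by simp)]
      simp
    rw [hhd]
    simp only [if_true]
    rw [List.map_cons]
    congr 1
    rw [List.filter_congr hpred, ← List.filter_filter]
    have hmap : ∀ (l : List (Int × String)),
        (l.filter (fun p => !(p.2 == h))).map Prod.snd
          = (l.map Prod.snd).filter (fun v => !(v == h)) := by
      intro l
      rw [List.filter_map]
      rfl
    rw [hmap, ih]
    rfl

-- ===== VERDICT (by name: the statement is the Claim_ definition above) =====
theorem find_column_dictionary_spec : Claim_equal_find_column_dictionary := by
  intro column _
  unfold Spec_find_column_dictionary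
  rw [pvA_closed]
  unfold find_column_dictionary_alt
  simp only [pvFirstGet]
  rw [pvFilterFirst]
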